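-- pv_equiv track=rewrite | github.com/phildsnutz/Xiphos-Vetting | backend/graph_ingest.py | _edge_intelligence_primary_family
-- ===== SOURCE A (Python) =====
-- def _edge_intelligence_primary_family(families: tuple[str, ...]) -> str:
--     if not families:
--         return "other"
--     for family in (
--         "ownership_control",
--         "contracts_and_programs",
--         "trade_and_logistics",
--         "cyber_supply_chain",
--         "official_and_regulatory",
--         "sanctions_and_legal",
--         "identity_and_alias",
--         "intermediaries_and_services",
--         "component_dependency",
--         "finance_intermediary",
--     ):
--         if family in families:
--             return family
--     return families[0]
-- ===== SOURCE B (Python) =====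
-- _PRIORITY = (
--     "ownership_control",
--     "contracts_and_programs",
--     "trade_and_logistics",
--     "cyber_supply_chain",
--     "official_and_regulatory",
--     "sanctions_and_legal",
--     "identity_and_alias",
--     "intermediaries_and_services",
--     "component_dependency",
--     "finance_intermediary",
-- )
--
-- _RANK = {name: i for i, name in enumerate(_PRIORITY)}
--
--
-- def _edge_intelligence_primary_family(families: tuple[str, ...]) -> str:
--     if not families:
--         return "other"
--     n = len(_PRIORITY)
--     return min(families, key=lambda f: _RANK.get(f, n))
-- ===== Notes on version B (the rewrite author's own statement) =====
-- stated objective: idiomatic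
-- what changed: A loops over the ten priority names testing membership in the tuple; B builds the name-to-rank dictionary once and returns min(families, key=rank), a single selection pass over the input.
import Mathlib
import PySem

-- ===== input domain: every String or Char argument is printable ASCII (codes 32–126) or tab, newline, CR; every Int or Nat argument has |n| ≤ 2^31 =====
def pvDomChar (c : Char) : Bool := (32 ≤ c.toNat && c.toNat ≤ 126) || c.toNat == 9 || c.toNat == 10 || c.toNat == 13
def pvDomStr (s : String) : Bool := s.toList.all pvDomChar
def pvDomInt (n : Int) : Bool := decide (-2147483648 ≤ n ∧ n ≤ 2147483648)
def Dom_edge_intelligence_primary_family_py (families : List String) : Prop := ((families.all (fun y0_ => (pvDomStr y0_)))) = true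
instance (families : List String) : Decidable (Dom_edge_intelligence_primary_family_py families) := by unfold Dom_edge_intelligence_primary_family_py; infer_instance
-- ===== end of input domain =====

-- B replaces A's ten sequential membership scans of the tuple by a rank dictionary
-- built once and a single min-by-rank pass over the input (objective: idiomatic).

-- the priority tuple both Pythons carry as a literal
def pvFamilyPriority : List String :=
  ["ownership_control", "contracts_and_programs", "trade_and_logistics",
   "cyber_supply_chain", "official_and_regulatory", "sanctions_and_legal",
   "identity_and_alias", "intermediaries_and_services", "component_dependency",
   "finance_intermediary"]

-- ===== PORT A =====
-- the for-loop with early return = first element of the priority tuple contained in families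
def edge_intelligence_primary_family_py (families : List String) : String :=
  match families with
  | [] => "other"
  | f0 :: _ =>
    match pvFamilyPriority.find? (fun family => families.contains family) with
    | some family => family
    | none => f0

-- ===== PORT B =====
-- _RANK = {name: i for i, name in enumerate(_PRIORITY)}
def pvRank : PySem.Dict String Int :=
  (PySem.List.enumerate pvFamilyPriority).foldl
    (fun d p => d.insert p.2 p.1) PySem.Dict.empty

-- min(families, key=lambda f: _RANK.get(f, n)); guard for the empty tuple
def edge_intelligence_primary_family_py_alt (families : List String) : String :=
  match families with
  | [] => "other"
  | _ :: _ =>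
    (PySem.List.min? families
      (fun f => pvRank.getD f (pvFamilyPriority.length : Int))).getD "other"

-- ===== PRECONDITION & SPEC =====
def Spec_edge_intelligence_primary_family_py (families : List String) (out : String) : Prop := out = edge_intelligence_primary_family_py_alt families
instance (families : List String) (out : String) : Decidable (Spec_edge_intelligence_primary_family_py families out) := by unfold Spec_edge_intelligence_primary_family_py; infer_instance

-- ===== CLAIM (what is proved, stated in full; the proofs are below) =====
def Claim_equal_edge_intelligence_primary_family_py : Prop := ∀ (families : List String), Dom_edge_intelligence_primary_family_py families → Spec_edge_intelligence_primary_family_py families (edge_intelligence_primary_family_py families)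

-- ===== LEMMAS AND PROOFS =====

-- proof-side rank function: position of f in prios, or n if absent
def pvRk (prios : List String) (n : Int) (f : String) : Int :=
  match prios with
  | [] => n
  | p :: ps => if p = f then 0 else 1 + pvRk ps (n - 1) f

-- the fold inside PySem.List.min?
def pvStep (k : String → Int) (acc : Option String) (x : String) : Option String :=
  match acc with
  | none => some x
  | some m => if k x < k m then some x else some m

lemma foldl_min_const (k : String → Int) (t : List String) (a : String)
    (h : ∀ y ∈ t, ¬ k y < k a) : t.foldl (pvStep k) (some a) = some a := by
  induction t with
  | nil => rfl
  | cons y t ih =>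
    have hy := h y (by simp)
    simp only [List.foldl_cons, pvStep, if_neg hy]
    exact ih (fun z hz => h z (by simp [hz]))

lemma foldl_min_unique (k : String → Int) (t : List String) (m : String)
    (hm : m ∈ t)
    (hlow : ∀ y ∈ t, k m ≤ k y) (huniq : ∀ y ∈ t, k y = k m → y = m) :
    ∀ a : String, k m < k a → t.foldl (pvStep k) (some a) = some m := by
  induction t with
  | nil => cases hm
  | cons y t ih =>
    intro a ha
    by_cases hy : y = m
    · subst hy
      simp only [List.foldl_cons, pvStep, if_pos ha]
      exact foldl_min_const k t y (fun z hz h => by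
        have := hlow z (by simp [hz]); omega)
    · have hym : m ∈ t := by
        rcases List.mem_cons.mp hm with h | h
        · exact absurd h.symm hy
        · exact h
      have hlt : k m < k y := by
        have h1 := hlow y (by simp)
        have h2 : k y ≠ k m := fun h => hy (huniq y (by simp) h)
        omega
      simp only [List.foldl_cons, pvStep]
      by_cases hc : k y < k a
      · rw [if_pos hc]
        exact ih hym (fun z hz => hlow z (by simp [hz]))
          (fun z hz h => huniq z (by simp [hz]) h) y hlt
      · rw [if_neg hc]
        exact ih hym (fun z hz => hlow z (by simp [hz]))
          (fun z hz h => huniq z (by simp [hz]) h) a ha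

lemma min?_cons (k : String → Int) (x : String) (t : List String) :
    PySem.List.min? (x :: t) k = t.foldl (pvStep k) (some x) := by
  simp only [PySem.List.min?, List.foldl_cons]
  exact List.foldl_ext _ _ _ (fun acc y _ => by cases acc <;> rfl)

lemma min?_unique (k : String → Int) (xs : List String) (m : String)
    (hm : m ∈ xs) (hlow : ∀ y ∈ xs, k m ≤ k y)
    (huniq : ∀ y ∈ xs, k y = k m → y = m) :
    PySem.List.min? xs k = some m := by
  cases xs with
  | nil => cases hm
  | cons x t =>
    rw [min?_cons]
    by_cases hx : x = m
    · subst hx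
      exact foldl_min_const k t x (fun z hz h => by
        have := hlow z (by simp [hz]); omega)
    · have hmt : m ∈ t := by
        rcases List.mem_cons.mp hm with h | h
        · exact absurd h.symm hx
        · exact h
      have hlt : k m < k x := by
        have h1 := hlow x (by simp)
        have h2 : k x ≠ k m := fun h => hx (huniq x (by simp) h)
        omega
      exact foldl_min_unique k t m hmt (fun z hz => hlow z (by simp [hz]))
        (fun z hz h => huniq z (by simp [hz]) h) x hlt

lemma foldl_min_congr (k1 k2 : String → Int) (S : List String)
    (h : ∀ x ∈ S, ∀ y ∈ S, (k1 x < k1 y ↔ k2 x < k2 y)) :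
    ∀ t, t ⊆ S → ∀ a ∈ S, t.foldl (pvStep k1) (some a) = t.foldl (pvStep k2) (some a) := by
  intro t
  induction t with
  | nil => intro _ a _; rfl
  | cons y t ih =>
    intro hts a ha
    have hy : y ∈ S := hts (by simp)
    have ht : t ⊆ S := fun z hz => hts (by simp [hz])
    simp only [List.foldl_cons, pvStep]
    by_cases hc : k1 y < k1 a
    · rw [if_pos hc, if_pos ((h y hy a ha).mp hc)]
      exact ih ht y hy
    · rw [if_neg hc, if_neg (fun h2 => hc ((h y hy a ha).mpr h2))]
      exact ih ht a ha

lemma min?_congr (k1 k2 : String → Int) (xs : List String)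
    (h : ∀ x ∈ xs, ∀ y ∈ xs, (k1 x < k1 y ↔ k2 x < k2 y)) :
    PySem.List.min? xs k1 = PySem.List.min? xs k2 := by
  cases xs with
  | nil => rfl
  | cons x t =>
    rw [min?_cons, min?_cons]
    exact foldl_min_congr k1 k2 (x :: t) h t (fun z hz => by simp [hz]) x (by simp)

lemma pvRk_nonneg (prios : List String) : ∀ (n : Int), (prios.length : Int) ≤ n →
    ∀ f, 0 ≤ pvRk prios n f := by
  induction prios with
  | nil => intro n h f; simp at h; simpa [pvRk] using h
  | cons p ps ih =>
    intro n h f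
    simp only [pvRk]
    by_cases hf : p = f
    · simp [hf]
    · rw [if_neg hf]
      have := ih (n - 1) (by simp at h; omega) f
      omega

lemma find_min (prios : List String) : ∀ (n : Int) (f0 : String) (rest : List String),
    (prios.length : Int) ≤ n →
    (match prios.find? (fun p => (f0 :: rest).contains p) with
     | some p => PySem.List.min? (f0 :: rest) (pvRk prios n) = some p
     | none => PySem.List.min? (f0 :: rest) (pvRk prios n) = some f0) := by
  induction prios with
  | nil =>
    intro n f0 rest _
    simp only [List.find?_nil]
    rw [min?_cons]
    exact foldl_min_const _ rest f0 (by simp [pvRk])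
  | cons p ps ih =>
    intro n f0 rest hn
    have hn' : (ps.length : Int) ≤ n - 1 := by simp at hn; omega
    by_cases hc : (f0 :: rest).contains p
    · simp only [List.find?_cons, hc]
      have hpp : pvRk (p :: ps) n p = 0 := by simp [pvRk]
      have hgen : ∀ y, y ≠ p → pvRk (p :: ps) n y = 1 + pvRk ps (n - 1) y :=
        fun y hy => by simp [pvRk, (Ne.symm hy : p ≠ y)]
      apply min?_unique
      · simpa using hc
      · intro y _
        rw [hpp]
        by_cases hy : y = p
        · rw [hy, hpp]
        · rw [hgen y hy]
          have := pvRk_nonneg ps (n - 1) hn' y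
          omega
      · intro y _ hy0
        by_cases hy : y = p
        · exact hy
        · exfalso
          rw [hgen y hy, hpp] at hy0
          have := pvRk_nonneg ps (n - 1) hn' y
          omega
    · simp only [List.find?_cons, hc]
      have hne : ∀ y ∈ (f0 :: rest), y ≠ p := by
        intro y hy he
        subst he
        exact absurd (by simpa [List.contains_iff_mem] using hy) (by simpa using hc)
      have hcong : PySem.List.min? (f0 :: rest) (pvRk (p :: ps) n)
          = PySem.List.min? (f0 :: rest) (pvRk ps (n - 1)) := by
        apply min?_congr
        intro x hx y hy
        rw [show pvRk (p :: ps) n x = 1 + pvRk ps (n - 1) x from by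
              simp [pvRk, (Ne.symm (hne x hx) : p ≠ x)],
            show pvRk (p :: ps) n y = 1 + pvRk ps (n - 1) y from by
              simp [pvRk, (Ne.symm (hne y hy) : p ≠ y)]]
        omega
      have hih := ih (n - 1) f0 rest hn'
      cases hfind : ps.find? (fun q => (f0 :: rest).contains q) with
      | some q => rw [hfind] at hih; simp only; rw [hcong]; exact hih
      | none => rw [hfind] at hih; simp only; rw [hcong]; exact hih

-- the dict lookup B does equals the proof-side rank function
-- pvRank evaluated to its literal association list
lemma rank_lit : pvRank = PySem.Dict.mk
    [("ownership_control", 0), ("contracts_and_programs", 1), ("trade_and_logistics", 2),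
     ("cyber_supply_chain", 3), ("official_and_regulatory", 4), ("sanctions_and_legal", 5),
     ("identity_and_alias", 6), ("intermediaries_and_services", 7), ("component_dependency", 8),
     ("finance_intermediary", 9)] := by rfl

set_option maxHeartbeats 1000000 in
lemma key_eq : ∀ f, pvRank.getD f (pvFamilyPriority.length : Int)
    = pvRk pvFamilyPriority 10 f := by
  intro f
  rw [rank_lit]
  show PySem.Dict.getD _ f 10 = _
  simp only [PySem.Dict.getD, PySem.Dict.get?_mk_cons, pvFamilyPriority, pvRk, beq_iff_eq]
  split_ifs <;> simp [PySem.Dict.get?]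

theorem edge_intelligence_primary_family_py_spec : Claim_equal_edge_intelligence_primary_family_py := by
  intro families _
  unfold Spec_edge_intelligence_primary_family_py
  cases families with
  | nil => rfl
  | cons f0 rest =>
    have hG := find_min pvFamilyPriority 10 f0 rest (by decide)
    have hk : (fun f => pvRank.getD f (pvFamilyPriority.length : Int))
        = pvRk pvFamilyPriority 10 := funext key_eq
    simp only [edge_intelligence_primary_family_py,
      edge_intelligence_primary_family_py_alt, hk]
    cases hfind : pvFamilyPriority.find? (fun p => (f0 :: rest).contains p) with
    | some p => rw [hfind] at hG; rw [hG]; rfl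
    | none => rw [hfind] at hG; rw [hG]; rfl
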